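-- pv_equiv track=rewrite | github.com/HalcyonSolutions/MultiHopDatasetConstruction | triplet_creations/utils/verify_triplets.py | sort_path_by_node_match
-- ===== SOURCE A (Python) =====
-- from typing import Tuple, List
--
-- def sort_path_by_node_match(path_list: List[Tuple[List[str], List[str]]], valid_names: List[str]) -> Tuple[List[Tuple[List[str], List[str]]], List[int], List[int]]:
--     """
--     Sorts the path based on how many unique node names match the valid_names, and secondarily by the number of nodes if matches are equal.
--
--     Args:
--         path_list (List[Tuple[List[Any], List[Any]]]): A list of tuples representing nodes and relationships.
--         valid_names (List[str]): A list of valid node names for matching.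
--
--     Returns:
--         Tuple[List[Tuple[List[Any], List[Any]]], List[int], List[int]]: Sorted tuples, match counts, and node counts.
--     """
--     sorted_paths = sorted(
--         path_list,
--         key=lambda x: (len(set(x[0]) & set(valid_names)), -len(x[0])),
--         reverse=True
--     )
--     match_counts = [len(set(t[0]) & set(valid_names)) for t in sorted_paths]
--     node_counts = [len(t[0]) for t in sorted_paths]
--     return sorted_paths, match_counts, node_counts
-- ===== SOURCE B (Python) =====
-- from typing import Tuple, List
--
-- def sort_path_by_node_match(path_list: List[Tuple[List[str], List[str]]], valid_names: List[str]) -> Tuple[List[Tuple[List[str], List[str]]], List[int], List[int]]: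
--     # Group paths into buckets keyed by (match count, node count); only the
--     # (few) distinct keys are sorted, then buckets are concatenated in key
--     # order.  Input order inside a bucket is preserved, which reproduces the
--     # stability of Python's sort on fully tied keys.
--     valid_set = set(valid_names)
--     buckets = {}
--     for p in path_list:
--         m = len(set(p[0]) & valid_set)
--         n = len(p[0])
--         buckets.setdefault((m, n), []).append(p)
--     sorted_paths, match_counts, node_counts = [], [], []
--     for (m, n) in sorted(buckets, key=lambda k: (-k[0], k[1])):
--         group = buckets[(m, n)]
--         sorted_paths.extend(group)
--         match_counts.extend([m] * len(group))
--         node_counts.extend([n] * len(group))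
--     return sorted_paths, match_counts, node_counts
-- ===== Notes on version B (the rewrite author's own statement) =====
-- stated objective: faster
-- what changed: B does not sort the paths at all: it groups them into dict buckets keyed by (match count, node count) in one pass (building set(valid_names) once), sorts only the distinct keys and concatenates the buckets, emitting each bucket's counts as repeated constants; A stably sorts the whole path list with a key that rebuilds set(valid_names) per element and then recomputes both counts in two extra passes.
import Mathlib
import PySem

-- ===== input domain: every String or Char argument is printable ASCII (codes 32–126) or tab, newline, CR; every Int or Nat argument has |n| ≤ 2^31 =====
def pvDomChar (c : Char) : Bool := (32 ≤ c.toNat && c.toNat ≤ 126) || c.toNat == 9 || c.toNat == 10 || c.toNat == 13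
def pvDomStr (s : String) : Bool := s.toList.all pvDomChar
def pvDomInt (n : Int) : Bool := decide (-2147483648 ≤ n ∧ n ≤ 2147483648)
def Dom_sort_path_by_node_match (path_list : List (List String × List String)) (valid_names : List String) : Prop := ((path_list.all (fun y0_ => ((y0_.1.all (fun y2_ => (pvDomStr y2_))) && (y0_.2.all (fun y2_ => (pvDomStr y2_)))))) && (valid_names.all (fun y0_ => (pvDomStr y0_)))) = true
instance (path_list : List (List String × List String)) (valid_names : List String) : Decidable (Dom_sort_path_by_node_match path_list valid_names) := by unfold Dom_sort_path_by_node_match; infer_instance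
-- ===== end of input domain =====

-- B groups the paths into buckets keyed by (match count, node count), sorts only the distinct keys and concatenates the buckets, instead of A's full stable sort of the paths (objective: faster — the valid-name set is built once and only distinct keys are sorted; bucket concatenation reproduces A's stable-sort order because tied keys keep input order in both).
-- ===== PORT A =====
def sort_path_by_node_match (path_list : List (List String × List String)) (valid_names : List String) : (List (List String × List String)) × List Int × List Int :=
  let sorted_paths := PySem.List.sorted2 path_list
    (fun x => ((PySem.Set.inter (PySem.Set.ofList x.1) (PySem.Set.ofList valid_names)).length : Int))
    (fun x => -((x.1.length : Int))) true
  let match_counts := sorted_paths.map (fun t => ((PySem.Set.inter (PySem.Set.ofList t.1) (PySem.Set.ofList valid_names)).length : Int))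
  let node_counts := sorted_paths.map (fun t => ((t.1.length : Int)))
  (sorted_paths, match_counts, node_counts)

-- ===== PORT B =====
-- 'buckets.setdefault((m, n), []).append(p)' is ported as Dict.modify with default [] appending p;
-- 'buckets[(m, n)]' in the second loop is Dict.getD (the key is always present).
def sort_path_by_node_match_alt (path_list : List (List String × List String)) (valid_names : List String) : (List (List String × List String)) × List Int × List Int :=
  let valid_set := PySem.Set.ofList valid_names
  let buckets := path_list.foldl (fun d p =>
      d.modify (((PySem.Set.inter (PySem.Set.ofList p.1) valid_set).length : Int), ((p.1.length : Int))) [] (fun g => g ++ [p])) PySem.Dict.empty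
  let sortedKeys := PySem.List.sorted2 buckets.keys (fun k => -k.1) (fun k => k.2) false
  sortedKeys.foldl (fun acc k =>
      let group := buckets.getD k []
      (acc.1 ++ group,
       acc.2.1 ++ PySem.List.pyRepeat [k.1] ((group.length : Int)),
       acc.2.2 ++ PySem.List.pyRepeat [k.2] ((group.length : Int))))
    ([], [], [])

-- ===== PRECONDITION & SPEC =====
def Spec_sort_path_by_node_match (path_list : List (List String × List String)) (valid_names : List String) (out : (List (List String × List String)) × List Int × List Int) : Prop := out = sort_path_by_node_match_alt path_list valid_names
instance (path_list : List (List String × List String)) (valid_names : List String) (out : (List (List String × List String)) × List Int × List Int) : Decidable (Spec_sort_path_by_node_match path_list valid_names out) := by unfold Spec_sort_path_by_node_match; infer_instance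

-- ===== CLAIM (what is proved, stated in full; the proofs are below) =====
def Claim_equal_sort_path_by_node_match : Prop := ∀ (path_list : List (List String × List String)) (valid_names : List String), Dom_sort_path_by_node_match path_list valid_names → Spec_sort_path_by_node_match path_list valid_names (sort_path_by_node_match path_list valid_names)

-- ===== LEMMAS AND PROOFS =====

-- the key of a path: (match count, node count); and the common 'comes-strictly-before' test on keys
def pvKey (valid_names : List String) (p : List String × List String) : Int × Int :=
  (((PySem.Set.inter (PySem.Set.ofList p.1) (PySem.Set.ofList valid_names)).length : Int), ((p.1.length : Int)))

def pvB (a b : Int × Int) : Bool := decide (b.1 < a.1) || (!decide (a.1 < b.1) && decide (a.2 < b.2))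

theorem pvB_irrefl (a : Int × Int) : pvB a a = false := by simp [pvB]

theorem pvB_asymm {a b : Int × Int} (h : pvB a b = true) : pvB b a = false := by
  simp [pvB] at h ⊢; omega

theorem pvB_total {a b : Int × Int} (h1 : pvB a b = false) (h2 : pvB b a = false) : a = b := by
  simp [pvB] at h1 h2
  exact Prod.ext (by omega) (by omega)

theorem pvB_skip {x y z : Int × Int} (h1 : pvB x y = true) (h2 : pvB z y = false) : pvB z x = false := by
  simp [pvB] at h1 h2 ⊢; omega

-- A's element-level comparison (reverse=True over the tuple key) IS pvB on the keys
theorem pvBeforeA_eq (valid_names : List String) :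
    (fun a b : List String × List String =>
      (decide (((PySem.Set.inter (PySem.Set.ofList b.1) (PySem.Set.ofList valid_names)).length : Int) < ((PySem.Set.inter (PySem.Set.ofList a.1) (PySem.Set.ofList valid_names)).length : Int)) ||
       (!decide (((PySem.Set.inter (PySem.Set.ofList a.1) (PySem.Set.ofList valid_names)).length : Int) < ((PySem.Set.inter (PySem.Set.ofList b.1) (PySem.Set.ofList valid_names)).length : Int)) &&
        decide (-((b.1.length : Int)) < -((a.1.length : Int))))))
    = fun a b => pvB (pvKey valid_names a) (pvKey valid_names b) := by
  funext a b; simp [pvB, pvKey]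

-- B's key-level comparison (keys (-k.1, k.2), ascending) is also pvB
theorem pvBeforeK_eq :
    (fun a b : Int × Int => (decide (-a.1 < -b.1) || (!decide (-b.1 < -a.1) && decide (a.2 < b.2)))) = pvB := by
  funext a b; simp [pvB]

theorem pv_insertBy_append {α : Type} (before : α → α → Bool) (x : α) (l r : List α)
    (h : ∀ y ∈ l, before x y = false) :
    PySem.List.insertBy before x (l ++ r) = l ++ PySem.List.insertBy before x r := by
  induction l with
  | nil => rfl
  | cons y ys ih =>
      simp only [List.cons_append, PySem.List.insertBy, h y (by simp)]
      simp only [Bool.false_eq_true, if_false, List.cons.injEq, true_and]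
      exact ih (fun z hz => h z (by simp [hz]))

theorem pv_insertBy_front {α : Type} (before : α → α → Bool) (x : α) (r : List α)
    (h : ∀ y ∈ r, before x y = true) :
    PySem.List.insertBy before x r = x :: r := by
  cases r with
  | nil => rfl
  | cons y ys => simp [PySem.List.insertBy, h y (by simp)]

-- insertion into an already bucketed list
theorem pv_insert_buckets {α : Type} (kf : α → Int × Int) (x : α) (ks : List (Int × Int)) (f : Int × Int → List α)
    (hks : ks.Pairwise (fun a b => pvB a b = true)) (hmem : kf x ∈ ks)
    (hf : ∀ k ∈ ks, ∀ y ∈ f k, kf y = k) :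
    PySem.List.insertBy (fun a b => pvB (kf a) (kf b)) x (ks.flatMap f)
      = ks.flatMap (fun k => f k ++ if kf x == k then [x] else []) := by
  induction ks with
  | nil => simp at hmem
  | cons k ks ih =>
      rcases List.pairwise_cons.mp hks with ⟨hk, hks'⟩
      by_cases hx : kf x = k
      · have hnotin : k ∉ ks := fun hin => by simpa [pvB_irrefl] using hk k hin
        have h1 : ∀ y ∈ f k, pvB (kf x) (kf y) = false := by
          intro y hy; rw [hf k (by simp) y hy, hx]; exact pvB_irrefl k
        have h2 : ∀ y ∈ ks.flatMap f, pvB (kf x) (kf y) = true := by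
          intro y hy
          rcases List.mem_flatMap.mp hy with ⟨k', hk', hy'⟩
          rw [hf k' (by simp [hk']) y hy', hx]; exact hk k' hk'
        rw [List.flatMap_cons, pv_insertBy_append _ _ _ _ h1, pv_insertBy_front _ _ _ h2]
        have hrest : (ks.flatMap (fun k' => f k' ++ if (k == k') = true then [x] else [])) = ks.flatMap f := by
          apply List.flatMap_congr
          intro k' hk'
          have hne : k ≠ k' := fun he => hnotin (he ▸ hk')
          simp [beq_eq_false_iff_ne.mpr hne]
        rw [List.flatMap_cons, hx, hrest]
        simp
      · have h1 : ∀ y ∈ f k, pvB (kf x) (kf y) = false := by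
          intro y hy; rw [hf k (by simp) y hy]
          have hmem' : kf x ∈ ks := by
            rcases List.mem_cons.mp hmem with h | h
            · exact absurd h hx
            · exact h
          exact pvB_asymm (hk _ hmem')
        have hmem' : kf x ∈ ks := by
          rcases List.mem_cons.mp hmem with h | h
          · exact absurd h hx
          · exact h
        rw [List.flatMap_cons, pv_insertBy_append _ _ _ _ h1,
            ih hks' hmem' (fun k' hk' y hy => hf k' (by simp [hk']) y hy)]
        have hne : (kf x == k) = false := beq_eq_false_iff_ne.mpr hx
        rw [List.flatMap_cons, hne]
        simp

-- stable insertion sort equals concatenation of the buckets in key order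
theorem pv_sort_eq_buckets {α : Type} (kf : α → Int × Int) (xs : List α) (ks : List (Int × Int))
    (hks : ks.Pairwise (fun a b => pvB a b = true)) (hcov : ∀ x ∈ xs, kf x ∈ ks) :
    xs.foldl (fun acc x => PySem.List.insertBy (fun a b => pvB (kf a) (kf b)) x acc) []
      = ks.flatMap (fun k => xs.filter (fun x => kf x == k)) := by
  induction xs using List.reverseRecOn with
  | nil => simp
  | append_singleton ys x ih =>
      rw [List.foldl_append, List.foldl_cons, List.foldl_nil,
          ih (fun y hy => hcov y (by simp [hy]))]
      rw [pv_insert_buckets kf x ks _ hks (hcov x (by simp))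
            (fun k hk y hy => by
              have := List.of_mem_filter hy
              exact beq_iff_eq.mp this)]
      apply List.flatMap_congr
      intro k hk
      by_cases h : kf x = k <;> simp [List.filter_append, h]

-- pairwise facts for the sorted key list
theorem pv_insertBy_pairwiseR (x : Int × Int) (ys : List (Int × Int))
    (h : ys.Pairwise (fun a b => pvB b a = false)) :
    (PySem.List.insertBy pvB x ys).Pairwise (fun a b => pvB b a = false) := by
  induction ys with
  | nil => simp [PySem.List.insertBy]
  | cons y ys ih =>
      rcases List.pairwise_cons.mp h with ⟨hy, hys⟩
      by_cases hxy : pvB x y = true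
      · simp only [PySem.List.insertBy, hxy, if_true]
        refine List.pairwise_cons.mpr ⟨?_, h⟩
        intro z hz
        rcases List.mem_cons.mp hz with rfl | hz'
        · exact pvB_asymm hxy
        · exact pvB_skip hxy (hy z hz')
      · have hxy' : pvB x y = false := by
          cases hc : pvB x y
          · rfl
          · exact absurd hc hxy
        simp only [PySem.List.insertBy, hxy', Bool.false_eq_true, if_false]
        refine List.pairwise_cons.mpr ⟨?_, ih hys⟩
        intro z hz
        rcases (PySem.List.insertBy_mem_iff _ _ _ _).mp hz with rfl | hz'
        · exact hxy'
        · exact hy z hz'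

theorem pv_foldl_insertBy_pairwiseR (xs acc : List (Int × Int))
    (h : acc.Pairwise (fun a b => pvB b a = false)) :
    (xs.foldl (fun acc x => PySem.List.insertBy pvB x acc) acc).Pairwise (fun a b => pvB b a = false) := by
  induction xs generalizing acc with
  | nil => exact h
  | cons x xs ih => exact ih _ (pv_insertBy_pairwiseR x acc h)

theorem pvB_of_ne {a b : Int × Int} (h : pvB b a = false) (hne : a ≠ b) : pvB a b = true := by
  cases hc : pvB a b with
  | true => rfl
  | false => exact absurd (pvB_total hc h) hne

-- sorted2 with A's tuple key, reverse=True, is insertion sort by pvB on the keys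
theorem pvA_sorted_eq (path_list : List (List String × List String)) (valid_names : List String) :
    PySem.List.sorted2 path_list
      (fun x => ((PySem.Set.inter (PySem.Set.ofList x.1) (PySem.Set.ofList valid_names)).length : Int))
      (fun x => -((x.1.length : Int))) true
    = path_list.foldl (fun acc x =>
        PySem.List.insertBy (fun a b => pvB (pvKey valid_names a) (pvKey valid_names b)) x acc) [] := by
  show path_list.foldl (fun acc x => PySem.List.insertBy (fun a b : List String × List String =>
      (decide (((PySem.Set.inter (PySem.Set.ofList b.1) (PySem.Set.ofList valid_names)).length : Int) < ((PySem.Set.inter (PySem.Set.ofList a.1) (PySem.Set.ofList valid_names)).length : Int)) ||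
       (!decide (((PySem.Set.inter (PySem.Set.ofList a.1) (PySem.Set.ofList valid_names)).length : Int) < ((PySem.Set.inter (PySem.Set.ofList b.1) (PySem.Set.ofList valid_names)).length : Int)) &&
        decide (-((b.1.length : Int)) < -((a.1.length : Int)))))) x acc) [] = _
  rw [pvBeforeA_eq]

-- sorted2 with B's key-level tuple key, reverse=False, is insertion sort by pvB
theorem pvK_sorted_eq (K : List (Int × Int)) :
    PySem.List.sorted2 K (fun k => -k.1) (fun k => k.2) false
    = K.foldl (fun acc x => PySem.List.insertBy pvB x acc) [] := by
  show K.foldl (fun acc x => PySem.List.insertBy (fun a b : Int × Int =>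
      (decide (-a.1 < -b.1) || (!decide (-b.1 < -a.1) && decide (a.2 < b.2)))) x acc) [] = _
  rw [pvBeforeK_eq]

-- the grouping loop: the bucket stored at k is the filter of the input by key k
theorem pv_getD_foldl_modify {α : Type} (l : List α) (kf : α → Int × Int) (d : PySem.Dict (Int × Int) (List α)) (k : Int × Int) :
    (l.foldl (fun d p => d.modify (kf p) [] (fun g => g ++ [p])) d).getD k []
      = d.getD k [] ++ l.filter (fun p => kf p == k) := by
  induction l generalizing d with
  | nil => simp
  | cons p l ih =>
      rw [List.foldl_cons, ih, PySem.Dict.getD_modify]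
      by_cases h : k = kf p
      · simp [h, List.append_assoc]
      · have hne : (kf p == k) = false := beq_eq_false_iff_ne.mpr (fun he => h he.symm)
        simp [h, hne]

-- the assembled equivalence, stated over an abstract key function
theorem pv_final {α : Type} [DecidableEq α] (kf : α → Int × Int) (mf nf : α → Int)
    (hm : ∀ p, mf p = (kf p).1) (hn : ∀ p, nf p = (kf p).2) (xs : List α) :
    ((xs.foldl (fun acc x => PySem.List.insertBy (fun a b => pvB (kf a) (kf b)) x acc) [],
      (xs.foldl (fun acc x => PySem.List.insertBy (fun a b => pvB (kf a) (kf b)) x acc) []).map mf,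
      (xs.foldl (fun acc x => PySem.List.insertBy (fun a b => pvB (kf a) (kf b)) x acc) []).map nf))
    = (PySem.List.sorted2 (PySem.Set.ofList (xs.map kf)) (fun k => -k.1) (fun k => k.2) false).foldl
        (fun acc k => (acc.1 ++ xs.filter (fun x => kf x == k),
          acc.2.1 ++ PySem.List.pyRepeat [k.1] ((xs.filter (fun x => kf x == k)).length : Int),
          acc.2.2 ++ PySem.List.pyRepeat [k.2] ((xs.filter (fun x => kf x == k)).length : Int)))
        ([], [], []) := by
  rw [pvK_sorted_eq]
  have hnodupK : (PySem.Set.ofList (xs.map kf)).Nodup := PySem.Set.nodup_ofList _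
  have hperm : ((PySem.Set.ofList (xs.map kf)).foldl (fun acc x => PySem.List.insertBy pvB x acc) []).Perm (PySem.Set.ofList (xs.map kf)) := by
    rw [← pvK_sorted_eq]; exact PySem.List.sorted2_perm _ _ _ _
  have hnodup := hperm.symm.nodup hnodupK
  have hR := pv_foldl_insertBy_pairwiseR (PySem.Set.ofList (xs.map kf)) [] (by simp)
  have hstrict : ((PySem.Set.ofList (xs.map kf)).foldl (fun acc x => PySem.List.insertBy pvB x acc) []).Pairwise (fun a b => pvB a b = true) :=
    (hR.and hnodup).imp (fun h => pvB_of_ne h.1 h.2)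
  have hcov : ∀ x ∈ xs, kf x ∈ (PySem.Set.ofList (xs.map kf)).foldl (fun acc x => PySem.List.insertBy pvB x acc) [] := by
    intro x hx
    exact hperm.mem_iff.mpr ((PySem.Set.mem_ofList _ _).mpr (List.mem_map_of_mem hx))
  rw [pv_sort_eq_buckets kf xs _ hstrict hcov]
  rw [PySem.List.foldl_prod_mk
        (f := fun (a : List α) (k : Int × Int) => a ++ xs.filter (fun x => kf x == k))
        (g := fun (b : List Int × List Int) (k : Int × Int) =>
          (b.1 ++ PySem.List.pyRepeat [k.1] ((xs.filter (fun x => kf x == k)).length : Int),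
           b.2 ++ PySem.List.pyRepeat [k.2] ((xs.filter (fun x => kf x == k)).length : Int)))]
  rw [PySem.List.foldl_prod_mk
        (f := fun (a : List Int) (k : Int × Int) => a ++ PySem.List.pyRepeat [k.1] ((xs.filter (fun x => kf x == k)).length : Int))
        (g := fun (b : List Int) (k : Int × Int) => b ++ PySem.List.pyRepeat [k.2] ((xs.filter (fun x => kf x == k)).length : Int))]
  simp only [PySem.List.foldl_append_eq_flatMap, List.nil_append]
  refine Prod.ext rfl (Prod.ext ?_ ?_) <;>
  · dsimp only
    rw [List.map_flatMap]
    apply List.flatMap_congr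
    intro k hk
    rw [PySem.List.pyRepeat_singleton]
    simp only [Int.toNat_natCast]
    refine List.eq_replicate_iff.mpr ⟨by simp, ?_⟩
    intro b hb
    rcases List.mem_map.mp hb with ⟨p, hp, rfl⟩
    have hpk : kf p = k := beq_iff_eq.mp (List.mem_filter.mp hp).2
    first
      | rw [hm p, hpk]
      | rw [hn p, hpk]

-- ===== VERDICT (by name: the statement is the Claim_ definition above) =====
theorem sort_path_by_node_match_spec : Claim_equal_sort_path_by_node_match := by
  intro path_list valid_names _
  unfold Spec_sort_path_by_node_match sort_path_by_node_match sort_path_by_node_match_alt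
  rw [pvA_sorted_eq]
  simp only [PySem.Dict.keys_foldl_modify_key, PySem.Dict.keys_empty, PySem.Set.update_nil_left,
    pv_getD_foldl_modify, PySem.Dict.getD_empty, List.nil_append]
  exact pv_final
    (fun p : List String × List String =>
      (((PySem.Set.inter (PySem.Set.ofList p.1) (PySem.Set.ofList valid_names)).length : Int), ((p.1.length : Int))))
    _ _ (fun _ => rfl) (fun _ => rfl) path_list
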